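-- pv_equiv track=rewrite | github.com/jonathonreilly/toy-physics | scripts/frontier_s3_recognition_general.py | z3_ball_sites
-- ===== SOURCE A (Python) =====
-- def z3_ball_sites(R: int) -> list[tuple[int, int, int]]:
--     """All integer points within Euclidean distance R of origin."""
--     sites = []
--     for x in range(-R, R + 1):
--         for y in range(-R, R + 1):
--             for z in range(-R, R + 1):
--                 if x * x + y * y + z * z <= R * R:
--                     sites.append((x, y, z))
--     return sites
-- ===== SOURCE B (Python) =====
-- def z3_ball_sites(R: int) -> list[tuple[int, int, int]]:
--     """All integer points within Euclidean distance R of origin."""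
--     sites = []
--     for x in range(-R, R + 1):
--         for y in range(-R, R + 1):
--             r2 = R * R - x * x - y * y
--             if r2 < 0:
--                 continue
--             m = 0
--             while (m + 1) * (m + 1) <= r2:
--                 m += 1
--             for z in range(-m, m + 1):
--                 sites.append((x, y, z))
--     return sites
-- ===== Notes on version B (the rewrite author's own statement) =====
-- stated objective: alternative
-- what changed: The innermost z loop with a per-point distance test is replaced by computing, for each (x,y), the exact z-bound m = floor(sqrt(R^2-x^2-y^2)) by an incremental integer-sqrt scan (skipping (x,y) outside the disc) and emitting z in range(-m, m+1) with no test at all.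
import Mathlib
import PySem

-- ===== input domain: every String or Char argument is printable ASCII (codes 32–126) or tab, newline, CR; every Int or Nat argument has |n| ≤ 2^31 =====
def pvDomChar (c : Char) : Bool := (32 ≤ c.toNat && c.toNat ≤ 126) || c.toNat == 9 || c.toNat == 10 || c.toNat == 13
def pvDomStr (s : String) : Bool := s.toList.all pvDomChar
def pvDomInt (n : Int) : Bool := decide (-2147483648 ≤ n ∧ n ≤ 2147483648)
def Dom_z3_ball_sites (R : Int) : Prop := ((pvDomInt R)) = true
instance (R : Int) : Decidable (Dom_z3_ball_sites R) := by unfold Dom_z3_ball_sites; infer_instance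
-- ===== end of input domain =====

-- B replaces the per-point distance test by an exact per-(x,y) z-bound (integer sqrt by an incremental scan), so the inner loop emits points unconditionally.

-- ===== PORT A =====
def z3_ball_sites (R : Int) : List (Int × Int × Int) :=
  (PySem.List.pyRange (-R) (R + 1)).foldl (fun sites x =>
    (PySem.List.pyRange (-R) (R + 1)).foldl (fun sites y =>
      (PySem.List.pyRange (-R) (R + 1)).foldl (fun sites z =>
        if x * x + y * y + z * z ≤ R * R then sites ++ [(x, y, z)] else sites)
        sites) sites) []

-- ===== PORT B =====
-- the 'while (m+1)*(m+1) <= r2: m += 1' loop of Source B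
def z3FindM (r2 m : Int) : Int :=
  if (m + 1) * (m + 1) ≤ r2 then z3FindM r2 (m + 1) else m
termination_by (r2 - m).toNat
decreasing_by
  have h : m + 1 ≤ (m + 1) * (m + 1) := by nlinarith
  omega

def z3_ball_sites_alt (R : Int) : List (Int × Int × Int) :=
  (PySem.List.pyRange (-R) (R + 1)).foldl (fun sites x =>
    (PySem.List.pyRange (-R) (R + 1)).foldl (fun sites y =>
      let r2 := R * R - x * x - y * y
      if r2 < 0 then sites
      else
        let m := z3FindM r2 0
        (PySem.List.pyRange (-m) (m + 1)).foldl (fun sites z => sites ++ [(x, y, z)]) sites)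
      sites) []

-- ===== PRECONDITION & SPEC =====
def Spec_z3_ball_sites (R : Int) (out : List (Int × Int × Int)) : Prop := out = z3_ball_sites_alt R
instance (R : Int) (out : List (Int × Int × Int)) : Decidable (Spec_z3_ball_sites R out) := by unfold Spec_z3_ball_sites; infer_instance

-- ===== CLAIM (what is proved, stated in full; the proofs are below) =====
def Claim_equal_z3_ball_sites : Prop := ∀ (R : Int), Dom_z3_ball_sites R → Spec_z3_ball_sites R (z3_ball_sites R)

-- ===== LEMMAS AND PROOFS =====

-- the while loop computes the floor square root bracket
lemma z3FindM_spec (r2 m : Int) (h0 : 0 ≤ m) (h1 : m * m ≤ r2) :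
    0 ≤ z3FindM r2 m ∧ z3FindM r2 m * z3FindM r2 m ≤ r2 ∧
      r2 < (z3FindM r2 m + 1) * (z3FindM r2 m + 1) := by
  have H : ∀ (k : Nat) (m : Int), (r2 - m).toNat ≤ k → 0 ≤ m → m * m ≤ r2 →
      0 ≤ z3FindM r2 m ∧ z3FindM r2 m * z3FindM r2 m ≤ r2 ∧
        r2 < (z3FindM r2 m + 1) * (z3FindM r2 m + 1) := by
    intro k
    induction k with
    | zero =>
      intro m hk h0 h1
      rw [z3FindM.eq_def]
      split_ifs with h
      · exfalso
        have : m + 1 ≤ (m + 1) * (m + 1) := by nlinarith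
        omega
      · exact ⟨h0, h1, by omega⟩
    | succ k ih =>
      intro m hk h0 h1
      rw [z3FindM.eq_def]
      split_ifs with h
      · have hle : m + 1 ≤ (m + 1) * (m + 1) := by nlinarith
        exact ih (m + 1) (by omega) (by omega) h
      · exact ⟨h0, h1, by omega⟩
  exact H (r2 - m).toNat m le_rfl h0 h1

-- filtering a range by an interval predicate yields the subrange
lemma filter_range_interval (a b lo hi : Int) (P : Int → Bool)
    (h1 : a ≤ lo) (h2 : lo ≤ hi) (h3 : hi ≤ b)
    (hP : ∀ z, a ≤ z → z < b → (P z = true ↔ (lo ≤ z ∧ z < hi))) :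
    (PySem.List.pyRange a b).filter P = PySem.List.pyRange lo hi := by
  rw [PySem.List.pyRange_one_append a lo b h1 (le_trans h2 h3),
      PySem.List.pyRange_one_append lo hi b h2 h3, List.filter_append, List.filter_append]
  have e1 : (PySem.List.pyRange a lo).filter P = [] := by
    rw [List.filter_eq_nil_iff]
    intro z hz
    obtain ⟨hz1, hz2⟩ := PySem.List.mem_pyRange_one.mp hz
    simp only [hP z hz1 (by omega)]
    omega
  have e3 : (PySem.List.pyRange hi b).filter P = [] := by
    rw [List.filter_eq_nil_iff]
    intro z hz
    obtain ⟨hz1, hz2⟩ := PySem.List.mem_pyRange_one.mp hz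
    simp only [hP z (by omega) hz2]
    omega
  have e2 : (PySem.List.pyRange lo hi).filter P = PySem.List.pyRange lo hi := by
    rw [List.filter_eq_self]
    intro z hz
    obtain ⟨hz1, hz2⟩ := PySem.List.mem_pyRange_one.mp hz
    exact (hP z (by omega) (by omega)).mpr ⟨hz1, hz2⟩
  rw [e1, e2, e3, List.nil_append, List.append_nil]

-- A's tested z loop equals B's bounded z loop, for each fixed (x, y)
lemma inner_eq (R x y : Int) (hR : 0 ≤ R) (sites : List (Int × Int × Int)) :
    (PySem.List.pyRange (-R) (R + 1)).foldl (fun s z =>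
        if x * x + y * y + z * z ≤ R * R then s ++ [(x, y, z)] else s) sites
    = if R * R - x * x - y * y < 0 then sites
      else (PySem.List.pyRange (-(z3FindM (R * R - x * x - y * y) 0))
              (z3FindM (R * R - x * x - y * y) 0 + 1)).foldl
              (fun s z => s ++ [(x, y, z)]) sites := by
  set r2 := R * R - x * x - y * y with hr2
  have hA := PySem.List.foldl_append_if
      (fun z : Int => decide (x * x + y * y + z * z ≤ R * R))
      (fun z : Int => (x, y, z)) (PySem.List.pyRange (-R) (R + 1)) sites
  simp only [decide_eq_true_eq] at hA
  rw [hA]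
  by_cases h : r2 < 0
  · rw [if_pos h]
    have : (PySem.List.pyRange (-R) (R + 1)).filter
        (fun z : Int => decide (x * x + y * y + z * z ≤ R * R)) = [] := by
      rw [List.filter_eq_nil_iff]
      intro z _
      simp only [decide_eq_true_eq]
      nlinarith [sq_nonneg z]
    rw [this, List.map_nil, List.append_nil]
  · rw [if_neg h]
    replace h : 0 ≤ r2 := by omega
    obtain ⟨hm0, hm1, hm2⟩ := z3FindM_spec r2 0 le_rfl (by simpa using h)
    set m := z3FindM r2 0
    have hmR : m ≤ R := by nlinarith
    rw [PySem.List.foldl_append_singleton_eq_map]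
    congr 1
    congr 1
    apply filter_range_interval _ _ _ _ _ (by omega) (by omega) (by omega)
    intro z _ _
    simp only [decide_eq_true_eq]
    constructor
    · intro hz
      constructor
      · nlinarith
      · nlinarith
    · rintro ⟨hz1, hz2⟩
      nlinarith

-- ===== VERDICT (by name: the statement is the Claim_ definition above) =====
theorem z3_ball_sites_spec : Claim_equal_z3_ball_sites := by
  intro R _
  unfold Spec_z3_ball_sites z3_ball_sites z3_ball_sites_alt
  by_cases hR : R < 0
  · rw [PySem.List.pyRange_one_eq_nil (by omega)]
    simp
  · have hR' : 0 ≤ R := by omega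
    congr 1
    funext sites x
    congr 1
    funext s y
    simpa using inner_eq R x y hR' s
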